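-- pv_equiv track=rewrite | github.com/anthon793/VehicleVision-NG | backend/services/plate_validator.py | _infer_position_hints
-- ===== SOURCE A (Python) =====
-- from typing import Optional, Tuple, List, Dict
--
-- def _infer_position_hints(text: str) -> Dict[int, str]:
--     """
--     Infer whether each position should be letter or number.
--     Based on common Nigerian plate formats.
--     """
--     hints = {}
--     n = len(text)
--
--     if n == 8:  # ABC123DE format
--         for i in range(3):
--             hints[i] = 'letter'
--         for i in range(3, 6):
--             hints[i] = 'number'
--         for i in range(6, 8):
--             hints[i] = 'letter'
--
--     elif n == 7:  # XX123ABC or ABC1234 format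
--         # Check which format it looks like
--         letters_at_start = sum(1 for c in text[:2] if c.isalpha())
--         if letters_at_start >= 1:
--             # XX 123 ABC format
--             hints[0] = 'letter'
--             hints[1] = 'letter'
--             for i in range(2, 5):
--                 hints[i] = 'number'
--             for i in range(5, 7):
--                 hints[i] = 'letter'
--         else:
--             # ABC 1234 format
--             for i in range(3):
--                 hints[i] = 'letter'
--             for i in range(3, 7):
--                 hints[i] = 'number'
--
--     elif n == 6:  # 123ABC format
--         for i in range(3):
--             hints[i] = 'number'
--         for i in range(3, 6):
--             hints[i] = 'letter'
--
--     return hints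
-- ===== SOURCE B (Python) =====
-- # B: table lookup of a length->layout pattern plus one enumerate pass,
-- # replacing A's if/elif dispatch with multiple range loops. Not faster; simpler.
-- from typing import Optional, Tuple, List, Dict
--
-- _PATTERNS = {8: 'LLLNNNLL', 6: 'NNNLLL'}
--
-- def _infer_position_hints(text: str) -> Dict[int, str]:
--     n = len(text)
--     if n == 7:
--         pattern = 'LLNNNLL' if sum(1 for c in text[:2] if c.isalpha()) >= 1 else 'LLLNNNN'
--     else:
--         pattern = _PATTERNS.get(n, '')
--     return {i: ('letter' if ch == 'L' else 'number') for i, ch in enumerate(pattern)}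
-- ===== Notes on version B (the rewrite author's own statement) =====
-- stated objective: simpler
-- what changed: Replaces the if/elif dispatch with five hand-written range loops by a precomputed length-to-layout pattern table (8->'LLLNNNLL', 6->'NNNLLL', 7 chosen by the same first-two-letters test) and a single enumerate pass over the pattern.
import Mathlib
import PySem

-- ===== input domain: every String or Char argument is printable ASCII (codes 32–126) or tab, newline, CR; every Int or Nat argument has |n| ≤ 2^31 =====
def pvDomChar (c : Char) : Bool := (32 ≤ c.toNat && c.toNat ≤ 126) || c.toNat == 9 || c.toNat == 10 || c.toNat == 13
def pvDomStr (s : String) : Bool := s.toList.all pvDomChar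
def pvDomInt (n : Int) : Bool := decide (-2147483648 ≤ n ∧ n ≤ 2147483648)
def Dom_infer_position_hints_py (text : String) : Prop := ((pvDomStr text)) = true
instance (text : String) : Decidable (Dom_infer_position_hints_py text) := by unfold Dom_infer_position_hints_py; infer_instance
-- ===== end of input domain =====

-- B replaces A's if/elif dispatch with range loops by a length->pattern table plus one enumerate pass; objective: simpler.


-- shared helper: sum(1 for c in text[:2] if c.isalpha()) — the same expression in A's source and in Source B
def lettersAtStart (text : String) : Int :=
  ((PySem.Str.slice text none (some 2)).toList.map
    (fun c => if PySem.Chars.isalpha c then (1 : Int) else 0)).sum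

-- ===== PORT A =====
def infer_position_hints_py (text : String) : List (Int × String) :=
  let hints : PySem.Dict Int String := PySem.Dict.empty
  let n : Int := PySem.Str.len text
  let hints :=
    if n = 8 then
      let hints := (PySem.List.pyRange 0 3 1).foldl (fun d i => d.insert i "letter") hints
      let hints := (PySem.List.pyRange 3 6 1).foldl (fun d i => d.insert i "number") hints
      (PySem.List.pyRange 6 8 1).foldl (fun d i => d.insert i "letter") hints
    else if n = 7 then
      if lettersAtStart text ≥ 1 then
        let hints := hints.insert 0 "letter"
        let hints := hints.insert 1 "letter"
        let hints := (PySem.List.pyRange 2 5 1).foldl (fun d i => d.insert i "number") hints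
        (PySem.List.pyRange 5 7 1).foldl (fun d i => d.insert i "letter") hints
      else
        let hints := (PySem.List.pyRange 0 3 1).foldl (fun d i => d.insert i "letter") hints
        (PySem.List.pyRange 3 7 1).foldl (fun d i => d.insert i "number") hints
    else if n = 6 then
      let hints := (PySem.List.pyRange 0 3 1).foldl (fun d i => d.insert i "number") hints
      (PySem.List.pyRange 3 6 1).foldl (fun d i => d.insert i "letter") hints
    else hints
  hints.items

-- ===== PORT B =====
def pvPatterns : PySem.Dict Int String := ⟨[(8, "LLLNNNLL"), (6, "NNNLLL")]⟩

def infer_position_hints_py_alt (text : String) : List (Int × String) :=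
  let n : Int := PySem.Str.len text
  let pattern : String :=
    if n = 7 then
      if lettersAtStart text ≥ 1 then "LLNNNLL" else "LLLNNNN"
    else pvPatterns.getD n ""
  (PySem.List.enumerate pattern.toList 0).map
    (fun p => (p.1, if p.2 = 'L' then "letter" else "number"))

-- ===== PRECONDITION & SPEC =====
def Spec_infer_position_hints_py (text : String) (out : List (Int × String)) : Prop := out = infer_position_hints_py_alt text
instance (text : String) (out : List (Int × String)) : Decidable (Spec_infer_position_hints_py text out) := by unfold Spec_infer_position_hints_py; infer_instance

-- ===== CLAIM (what is proved, stated in full; the proofs are below) =====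
def Claim_equal_infer_position_hints_py : Prop := ∀ (text : String), Dom_infer_position_hints_py text → Spec_infer_position_hints_py text (infer_position_hints_py text)

-- ===== LEMMAS AND PROOFS =====

-- ===== VERDICT (by name: the statement is the Claim_ definition above) =====
theorem infer_position_hints_py_spec : Claim_equal_infer_position_hints_py := by
  intro text _
  unfold Spec_infer_position_hints_py infer_position_hints_py infer_position_hints_py_alt
  by_cases h8 : PySem.Str.len text = 8
  · simp only [h8]; norm_num; decide
  · by_cases h7 : PySem.Str.len text = 7
    · by_cases hL : (1 : Int) ≤ lettersAtStart text
      · simp only [h7]; norm_num; rw [if_pos hL, if_pos hL]; decide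
      · simp only [h7]; norm_num; rw [if_neg hL, if_neg hL]; decide
    · by_cases h6 : PySem.Str.len text = 6
      · simp only [h6]; norm_num; decide
      · have h8n : ¬ ((text.length : Int) = 8) := by simpa using h8
        have h7n : ¬ ((text.length : Int) = 7) := by simpa using h7
        have h6n : ¬ ((text.length : Int) = 6) := by simpa using h6
        have b8 : (((8 : Int) == (text.length : Int)) = false) := by
          rw [beq_eq_false_iff_ne]; exact fun h => h8n h.symm
        have b6 : (((6 : Int) == (text.length : Int)) = false) := by
          rw [beq_eq_false_iff_ne]; exact fun h => h6n h.symm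
        simp [pvPatterns, PySem.Dict.getD, PySem.Dict.get?, List.find?, h8n, h7n, h6n, b8, b6,
          PySem.Dict.empty]
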